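-- pv_equiv track=rewrite | github.com/pramodsable6/Python | miscellaneous/count_rods.py | count_rods
-- ===== SOURCE A (Python) =====
-- def count_rods(rings):
--     B = []
--     G = []
--     R = []
--     for idx, value in enumerate(rings):
--         if rings[idx] == 'B':
--             B.append(rings[idx+1])
--         elif rings[idx] == 'G':
--             G.append(rings[idx+1])
--         elif rings[idx] == 'R':
--             R.append(rings[idx+1])
--     return len(set(B).intersection(set(G)).intersection(set(R)))
-- ===== SOURCE B (Python) =====
-- def count_rods(rings):
--     rods = {}
--     for idx, value in enumerate(rings):
--         if value in ('B', 'G', 'R'):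
--             rods.setdefault(rings[idx + 1], set()).add(value)
--     return sum(1 for cols in rods.values() if len(cols) == 3)
-- ===== Notes on version B (the rewrite author's own statement) =====
-- stated objective: simpler
-- what changed: Instead of three per-color lists that are turned into sets and intersected, B keeps one dict mapping each rod label to the set of colors seen on it and counts the rods whose color-set is complete (size 3).
import Mathlib
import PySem

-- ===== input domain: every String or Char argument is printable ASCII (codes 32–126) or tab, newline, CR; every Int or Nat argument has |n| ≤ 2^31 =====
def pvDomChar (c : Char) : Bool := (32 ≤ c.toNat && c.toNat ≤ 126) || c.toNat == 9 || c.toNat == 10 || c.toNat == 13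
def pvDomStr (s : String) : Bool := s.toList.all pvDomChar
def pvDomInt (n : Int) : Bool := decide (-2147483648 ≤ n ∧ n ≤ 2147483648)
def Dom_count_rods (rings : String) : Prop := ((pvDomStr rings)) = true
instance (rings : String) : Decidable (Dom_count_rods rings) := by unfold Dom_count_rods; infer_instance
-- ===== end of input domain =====

-- B replaces A's three per-color lists and double set-intersection by one dict rod → set-of-colors,
-- counting the rods whose color-set is complete (objective: simpler grouping, same O(n) cost).

-- ===== PORT A =====
-- rings[idx] / rings[idx+1] are totalised with pyGetD (default ' '); exact under Pre_count_rods: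
-- idx is always in range, and idx+1 is read only when rings[idx] is a color, which Pre_ keeps off the last position.
def count_rods (rings : String) : Int :=
  let l := rings.toList
  let st := (PySem.List.enumerate l).foldl
    (fun (st : List Char × List Char × List Char) p =>
      if PySem.List.pyGetD l p.1 ' ' = 'B' then (st.1 ++ [PySem.List.pyGetD l (p.1 + 1) ' '], st.2.1, st.2.2)
      else if PySem.List.pyGetD l p.1 ' ' = 'G' then (st.1, st.2.1 ++ [PySem.List.pyGetD l (p.1 + 1) ' '], st.2.2)
      else if PySem.List.pyGetD l p.1 ' ' = 'R' then (st.1, st.2.1, st.2.2 ++ [PySem.List.pyGetD l (p.1 + 1) ' '])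
      else st)
    ([], [], [])
  PySem.Set.len (PySem.Set.inter (PySem.Set.inter (PySem.Set.ofList st.1) (PySem.Set.ofList st.2.1)) (PySem.Set.ofList st.2.2))

-- ===== PORT B =====
-- rods.setdefault(rings[idx+1], set()).add(value)  =  Dict.modify at key rings[idx+1] (in-place set mutation);
-- rings[idx+1] totalised with pyGetD (default ' '), exact under Pre_count_rods as above.
def count_rods_alt (rings : String) : Int :=
  let l := rings.toList
  let rods := (PySem.List.enumerate l).foldl
    (fun (d : PySem.Dict Char (PySem.Set Char)) p =>
      if p.2 = 'B' ∨ p.2 = 'G' ∨ p.2 = 'R' then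
        PySem.Dict.modify d (PySem.List.pyGetD l (p.1 + 1) ' ') PySem.Set.empty (fun s => PySem.Set.add s p.2)
      else d)
    PySem.Dict.empty
  (PySem.Dict.values rods).foldl (fun acc cols => if PySem.Set.len cols = 3 then acc + 1 else acc) 0

-- ===== PRECONDITION & SPEC =====
-- Pre_ excludes exactly the strings ending in 'B', 'G' or 'R', on which Python A (and B) raise IndexError at rings[idx+1].
def Pre_count_rods (rings : String) : Prop :=
  rings.toList.getLast? ≠ some 'B' ∧ rings.toList.getLast? ≠ some 'G' ∧ rings.toList.getLast? ≠ some 'R'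
instance (rings : String) : Decidable (Pre_count_rods rings) := by unfold Pre_count_rods; infer_instance

def pvWitness_count_rods : String := "B1G1R1"

def Spec_count_rods (rings : String) (out : Int) : Prop := out = count_rods_alt rings
instance (rings : String) (out : Int) : Decidable (Spec_count_rods rings out) := by unfold Spec_count_rods; infer_instance

-- ===== CLAIM (what is proved, stated in full; the proofs are below) =====
def Claim_equal_count_rods : Prop := ∀ (rings : String), Dom_count_rods rings → Pre_count_rods rings → Spec_count_rods rings (count_rods rings)

-- ===== LEMMAS AND PROOFS =====

-- next-ring reader shared by the two loop bodies
def pvNxt (l : List Char) (p : Int × Char) : Char := PySem.List.pyGetD l (p.1 + 1) ' '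

-- A's elif chain over the enumerate list = three independent filters
theorem pvTripleFold (l : List Char) (ps : List (Int × Char)) (acc : List Char × List Char × List Char) :
    ps.foldl
      (fun st p =>
        if p.2 = 'B' then (st.1 ++ [pvNxt l p], st.2.1, st.2.2)
        else if p.2 = 'G' then (st.1, st.2.1 ++ [pvNxt l p], st.2.2)
        else if p.2 = 'R' then (st.1, st.2.1, st.2.2 ++ [pvNxt l p])
        else st) acc
    = (acc.1 ++ (ps.filter (fun p => p.2 == 'B')).map (pvNxt l),
       acc.2.1 ++ (ps.filter (fun p => p.2 == 'G')).map (pvNxt l),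
       acc.2.2 ++ (ps.filter (fun p => p.2 == 'R')).map (pvNxt l)) := by
  induction ps generalizing acc with
  | nil => simp
  | cons q qs ih =>
    by_cases hB : q.2 = 'B'
    · simp [List.foldl_cons, ih, hB]
    · by_cases hG : q.2 = 'G'
      · simp [List.foldl_cons, ih, hG]
      · by_cases hR : q.2 = 'R'
        · simp [List.foldl_cons, ih, hR]
        · simp [List.foldl_cons, ih, hB, hG, hR]

-- the grouping loop's dict, read at one rod r
theorem pvDictFoldGetD (l : List Char) (qs : List (Int × Char)) (d : PySem.Dict Char (PySem.Set Char)) (r : Char) :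
    PySem.Dict.getD
      (qs.foldl (fun d p => PySem.Dict.modify d (pvNxt l p) PySem.Set.empty (fun s => PySem.Set.add s p.2)) d)
      r PySem.Set.empty
    = ((qs.filter (fun p => pvNxt l p == r)).map (·.2)).foldl PySem.Set.add (PySem.Dict.getD d r PySem.Set.empty) := by
  induction qs generalizing d with
  | nil => simp
  | cons q qs ih =>
    rw [List.foldl_cons, ih, List.filter_cons]
    by_cases hq : pvNxt l q = r
    · simp [hq]
    · have hq' : ¬(r = pvNxt l q) := fun h => hq h.symm
      simp [hq, hq', PySem.Dict.getD_modify]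

-- a nodup list of colors has 3 elements iff it holds all three colors
theorem pvLenThree (cs : List Char) (hnd : cs.Nodup) (hsub : ∀ x ∈ cs, x = 'B' ∨ x = 'G' ∨ x = 'R') :
    cs.length = 3 ↔ ('B' ∈ cs ∧ 'G' ∈ cs ∧ 'R' ∈ cs) := by
  classical
  have hcard : cs.toFinset.card = cs.length := List.toFinset_card_of_nodup hnd
  have hsubF : cs.toFinset ⊆ ({'B', 'G', 'R'} : Finset Char) := by
    intro x hx
    simp only [List.mem_toFinset] at hx
    rcases hsub x hx with h | h | h <;> simp [h]
  constructor
  · intro h3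
    have heq : ({'B', 'G', 'R'} : Finset Char) = cs.toFinset := by
      refine (Finset.eq_of_subset_of_card_le hsubF ?_).symm
      rw [hcard, h3]
      decide
    refine ⟨?_, ?_, ?_⟩ <;> (rw [← List.mem_toFinset, ← heq]; decide)
  · rintro ⟨hB, hG, hR⟩
    have hsup : ({'B', 'G', 'R'} : Finset Char) ⊆ cs.toFinset := by
      intro x hx
      simp only [Finset.mem_insert, Finset.mem_singleton] at hx
      rcases hx with h | h | h <;> (subst h; simp [hB, hG, hR])
    have heq := Finset.Subset.antisymm hsubF hsup
    rw [← hcard, heq]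
    decide

-- counting a nodup list against a countP over another nodup list with the same filtered membership
theorem pvCountBridge (X K : List Char) (P : Char → Bool) (hX : X.Nodup) (hK : K.Nodup)
    (h : ∀ c, c ∈ X ↔ (c ∈ K ∧ P c = true)) : X.length = K.countP P := by
  classical
  have hKf : (K.filter P).Nodup := hK.filter P
  have hset : X.toFinset = (K.filter P).toFinset := by
    ext c
    simp [h c]
  calc X.length = X.toFinset.card := (List.toFinset_card_of_nodup hX).symm
    _ = (K.filter P).toFinset.card := by rw [hset]
    _ = (K.filter P).length := List.toFinset_card_of_nodup hKf
    _ = K.countP P := (List.countP_eq_length_filter).symm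

theorem pvNxt_def (l : List Char) (p : Int × Char) : pvNxt l p = PySem.List.pyGetD l (p.1 + 1) ' ' := rfl

-- keys / nodup of the grouping dict (instances of the PySem foldl-modify lemmas)
theorem pvDictFoldKeys (l : List Char) (qs : List (Int × Char)) (d : PySem.Dict Char (PySem.Set Char)) :
    (qs.foldl (fun d p => PySem.Dict.modify d (pvNxt l p) PySem.Set.empty (fun s => PySem.Set.add s p.2)) d).keys
    = PySem.Set.update d.keys (qs.map (pvNxt l)) :=
  PySem.Dict.keys_foldl_modify_key qs (pvNxt l) PySem.Set.empty (fun _ p s => PySem.Set.add s p.2) d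

theorem pvDictFoldNodup (l : List Char) (qs : List (Int × Char)) (d : PySem.Dict Char (PySem.Set Char))
    (h : d.keys.Nodup) :
    (qs.foldl (fun d p => PySem.Dict.modify d (pvNxt l p) PySem.Set.empty (fun s => PySem.Set.add s p.2)) d).keys.Nodup :=
  PySem.Dict.nodup_keys_foldl_modify_key qs (pvNxt l) PySem.Set.empty (fun _ p s => PySem.Set.add s p.2) d h

-- a color seen on rod c in the grouped pairs ↔ rod c in that color's per-color list
theorem pvColorMem (l : List Char) (χ c : Char) (hχ : χ = 'B' ∨ χ = 'G' ∨ χ = 'R') :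
    χ ∈ (((PySem.List.enumerate l 0).filter (fun p => decide (p.2 = 'B' ∨ p.2 = 'G' ∨ p.2 = 'R'))).filter
          (fun p => pvNxt l p == c)).map (fun p => p.2)
    ↔ c ∈ ((PySem.List.enumerate l 0).filter (fun p => p.2 == χ)).map (pvNxt l) := by
  simp only [List.mem_map, List.mem_filter, beq_iff_eq, decide_eq_true_eq]
  constructor
  · rintro ⟨q, ⟨⟨hq, -⟩, hc⟩, hval⟩
    exact ⟨q, ⟨hq, hval⟩, hc⟩
  · rintro ⟨q, ⟨hq, hval⟩, hc⟩
    exact ⟨q, ⟨⟨hq, by rw [hval]; exact hχ⟩, hc⟩, hval⟩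

theorem pvMain (rings : String) : count_rods rings = count_rods_alt rings := by
  simp only [count_rods, count_rods_alt]
  generalize rings.toList = l
  simp only [← pvNxt_def]
  -- A side: rings[idx] = value on the enumerate list, then split the elif chain into three filters
  rw [PySem.List.foldl_congr_mem (PySem.List.enumerate l 0) _
      (fun (st : List Char × List Char × List Char) p =>
        if p.2 = 'B' then (st.1 ++ [pvNxt l p], st.2.1, st.2.2)
        else if p.2 = 'G' then (st.1, st.2.1 ++ [pvNxt l p], st.2.2)
        else if p.2 = 'R' then (st.1, st.2.1, st.2.2 ++ [pvNxt l p])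
        else st) ([], [], [])
      (by
        intro acc p hp
        obtain ⟨k, hk, rfl⟩ := (PySem.List.mem_enumerate_iff l 0 p).mp hp
        simp [PySem.List.pyGetD_natCast, List.getD_eq_getElem?_getD, List.getElem?_eq_getElem hk]),
    pvTripleFold l (PySem.List.enumerate l 0) ([], [], [])]
  simp only [List.nil_append]
  -- B side: drop the guard into a filter
  rw [PySem.List.foldl_ite_eq_foldl_filter (fun p : Int × Char => p.2 = 'B' ∨ p.2 = 'G' ∨ p.2 = 'R')
      (fun d p => PySem.Dict.modify d (pvNxt l p) PySem.Set.empty (fun s => PySem.Set.add s p.2))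
      (PySem.List.enumerate l 0) PySem.Dict.empty]
  set qs := (PySem.List.enumerate l 0).filter (fun p => decide (p.2 = 'B' ∨ p.2 = 'G' ∨ p.2 = 'R')) with hqs
  set rods := qs.foldl (fun d p => PySem.Dict.modify d (pvNxt l p) PySem.Set.empty (fun s => PySem.Set.add s p.2))
      PySem.Dict.empty with hrods
  have hnd : rods.keys.Nodup := pvDictFoldNodup l qs PySem.Dict.empty List.nodup_nil
  have hkeys : rods.keys = PySem.Set.ofList (qs.map (pvNxt l)) := by
    rw [hrods, pvDictFoldKeys]
    exact PySem.Set.update_nil_left _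
  have hgetD : ∀ c, rods.getD c PySem.Set.empty
      = PySem.Set.ofList ((qs.filter (fun p => pvNxt l p == c)).map (fun p => p.2)) := by
    intro c
    rw [hrods, pvDictFoldGetD, PySem.Set.ofList_eq_foldl]
    rfl
  rw [PySem.Dict.values_eq_map_keys rods hnd PySem.Set.empty]
  simp only [List.foldl_map]
  rw [PySem.List.foldl_ite_add_one (fun k => PySem.Set.len (rods.getD k PySem.Set.empty) = 3)]
  rw [zero_add, hkeys, PySem.Set.len_eq]
  rw [Nat.cast_inj]
  apply pvCountBridge
  · exact PySem.Set.nodup_inter _ _ (PySem.Set.nodup_inter _ _ (PySem.Set.nodup_ofList _))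
  · exact PySem.Set.nodup_ofList _
  · intro c
    rw [PySem.Set.mem_inter, PySem.Set.mem_inter, PySem.Set.mem_ofList, PySem.Set.mem_ofList,
      PySem.Set.mem_ofList, PySem.Set.mem_ofList, decide_eq_true_eq, hgetD c, PySem.Set.len_eq]
    have hlen3 : (↑(PySem.Set.ofList ((qs.filter (fun p => pvNxt l p == c)).map (fun p => p.2))).length : Int) = 3
        ↔ (PySem.Set.ofList ((qs.filter (fun p => pvNxt l p == c)).map (fun p => p.2))).length = 3 := by
      omega
    rw [hlen3, pvLenThree _ (PySem.Set.nodup_ofList _) (by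
        intro x hx
        rw [PySem.Set.mem_ofList] at hx
        simp only [List.mem_map, List.mem_filter, hqs, decide_eq_true_eq] at hx
        obtain ⟨q, ⟨⟨-, hcol⟩, -⟩, rfl⟩ := hx
        exact hcol)]
    rw [PySem.Set.mem_ofList, PySem.Set.mem_ofList, PySem.Set.mem_ofList]
    rw [hqs, pvColorMem l 'B' c (by tauto), pvColorMem l 'G' c (by tauto), pvColorMem l 'R' c (by tauto)]
    constructor
    · rintro ⟨⟨hB, hG⟩, hR⟩
      refine ⟨?_, hB, hG, hR⟩
      -- c is a key: it is the rod of some colored pair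
      simp only [List.mem_map, List.mem_filter, beq_iff_eq] at hB
      obtain ⟨q, ⟨hq, hqB⟩, hval⟩ := hB
      simp only [List.mem_map, List.mem_filter, decide_eq_true_eq]
      exact ⟨q, ⟨hq, Or.inl hqB⟩, hval⟩
    · rintro ⟨-, hB, hG, hR⟩
      exact ⟨⟨hB, hG⟩, hR⟩

-- ===== VERDICT (by name: the statement is the Claim_ definition above) =====
theorem count_rods_spec : Claim_equal_count_rods := by
  intro rings _ _
  exact pvMain rings
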